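-- pv_equiv track=rewrite | github.com/betich/comp-prog | exam preparation/grader/07/07_32★★★.py | case4
-- ===== SOURCE A (Python) =====
-- def case4(p):
--     p = [*p]
--     t1 = ['0', '1', '2', '3', '4', '5', '6', '7', '8', '9', '0', '1', '2']
--     t2 = t1[:]
--     t2.reverse()
--     for i in range(len(p) - 3):
--         try:
--             if p[i:i + 4] == t1[t1.index(p[i]):t1.index(p[i]) + 4]:
--                 return False
--         except:
--             pass
--         try:
--             if p[i:i + 4] == t2[t2.index(p[i]):t2.index(p[i]) + 4]:
--                 return False
--         except:
--             pass
--     return True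
-- ===== SOURCE B (Python) =====
-- DIGITS = {str(i): i for i in range(10)}
--
-- def case4(p):
--     p = [*p]
--     prev = None
--     asc = desc = 0
--     for c in p:
--         d = DIGITS.get(c) if isinstance(c, str) else None
--         if d is None:
--             prev, asc, desc = None, 0, 0
--         else:
--             asc = asc + 1 if prev is not None and (d - prev) % 10 == 1 else 1
--             desc = desc + 1 if prev is not None and (prev - d) % 10 == 1 else 1
--             if asc >= 4 or desc >= 4:
--                 return False
--             prev = d
--     return True
-- ===== Notes on version B (the rewrite author's own statement) =====
-- stated objective: faster
-- what changed: Replaced the per-index comparison of each 4-window against slices of ascending/descending digit tables located with list.index under try/except by a single pass that maintains incremental ascending/descending run-length counters and fails as soon as a run reaches 4.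
import Mathlib
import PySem

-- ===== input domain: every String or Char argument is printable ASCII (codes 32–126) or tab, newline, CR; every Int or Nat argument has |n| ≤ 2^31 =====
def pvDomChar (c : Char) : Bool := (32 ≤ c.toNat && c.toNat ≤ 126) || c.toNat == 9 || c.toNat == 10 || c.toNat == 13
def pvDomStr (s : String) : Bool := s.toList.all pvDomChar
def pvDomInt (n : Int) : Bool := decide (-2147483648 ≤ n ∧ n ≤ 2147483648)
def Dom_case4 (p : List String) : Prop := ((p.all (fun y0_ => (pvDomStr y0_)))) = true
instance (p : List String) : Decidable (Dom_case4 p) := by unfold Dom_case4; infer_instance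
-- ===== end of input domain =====

-- B replaces A's per-window comparison against table slices located with list.index/try-except
-- by a single pass with incremental ascending/descending run-length counters (objective: faster, measured constant-factor).

-- ===== PORT A =====
def pvT1 : List String := ["0","1","2","3","4","5","6","7","8","9","0","1","2"]
def pvT2 : List String := pvT1.reverse

def pvCheckA (p : List String) (i : Int) : Bool :=
  (match PySem.List.pyGet? p i with
   | none => false
   | some s =>
     match PySem.List.index? pvT1 s with
     | none => false
     | some j => PySem.List.slice p (some i) (some (i + 4)) ==
                 PySem.List.slice pvT1 (some (j : Int)) (some ((j : Int) + 4)))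
  ||
  (match PySem.List.pyGet? p i with
   | none => false
   | some s =>
     match PySem.List.index? pvT2 s with
     | none => false
     | some j => PySem.List.slice p (some i) (some (i + 4)) ==
                 PySem.List.slice pvT2 (some (j : Int)) (some ((j : Int) + 4)))

def case4 (p : List String) : Bool :=
  !((PySem.List.pyRange 0 ((p.length : Int) - 3) 1).any (fun i => pvCheckA p i))

-- ===== PORT B =====
def pvDigits : PySem.Dict String Int :=
  PySem.Dict.ofList [("0",0),("1",1),("2",2),("3",3),("4",4),("5",5),("6",6),("7",7),("8",8),("9",9)]

def pvLoopB : List String → Option Int → Int → Int → Bool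
  | [], _, _, _ => true
  | c :: rest, prev, asc, desc =>
    match PySem.Dict.get? pvDigits c with
    | none => pvLoopB rest none 0 0
    | some d =>
      let asc' := if (match prev with
                      | some q => PySem.Int.mod (d - q) 10 == 1
                      | none => false) then asc + 1 else 1
      let desc' := if (match prev with
                       | some q => PySem.Int.mod (q - d) 10 == 1
                       | none => false) then desc + 1 else 1
      if 4 ≤ asc' || 4 ≤ desc' then false else pvLoopB rest (some d) asc' desc'

def case4_alt (p : List String) : Bool := pvLoopB p none 0 0

-- ===== PRECONDITION & SPEC =====
def Spec_case4 (p : List String) (out : Bool) : Prop := out = case4_alt p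
instance (p : List String) (out : Bool) : Decidable (Spec_case4 p out) := by unfold Spec_case4; infer_instance

-- ===== CLAIM (what is proved, stated in full; the proofs are below) =====
def Claim_equal_case4 : Prop := ∀ (p : List String), Dom_case4 p → Spec_case4 p (case4 p)

-- ===== LEMMAS AND PROOFS =====

-- the neighbour tests B performs
def stepA (q d : Int) : Bool := PySem.Int.mod (d - q) 10 == 1
def stepD (q d : Int) : Bool := PySem.Int.mod (q - d) 10 == 1

-- "the first m elements of l are digits chaining from q under f"
def chain (f : Int → Int → Bool) : Int → List String → Nat → Bool
  | _, _, 0 => true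
  | q, l, m + 1 =>
    match l with
    | [] => false
    | c :: l' =>
      match PySem.Dict.get? pvDigits c with
      | none => false
      | some d => f q d && chain f d l' m

-- "a bad quadruple starts at the head"
def hd4 : List String → Bool
  | [] => false
  | c :: l =>
    match PySem.Dict.get? pvDigits c with
    | none => false
    | some d => chain stepA d l 3 || chain stepD d l 3

-- "some suffix starts with a bad quadruple"
def bad : List String → Bool
  | [] => false
  | c :: l => hd4 (c :: l) || bad l

theorem chain_zero (f : Int → Int → Bool) (q : Int) (l : List String) : chain f q l 0 = true := by
  simp [chain]

theorem chain_len (f : Int → Int → Bool) :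
    ∀ (m : Nat) (q : Int) (l : List String), chain f q l m = true → m ≤ l.length := by
  intro m
  induction m with
  | zero => intro q l _; omega
  | succ m ih =>
    intro q l h
    cases l with
    | nil => simp [chain] at h
    | cons c rest =>
      simp only [chain] at h
      cases hc : PySem.Dict.get? pvDigits c with
      | none => rw [hc] at h; simp at h
      | some d =>
        rw [hc] at h; simp at h
        have := ih d rest h.2
        simp only [List.length_cons]
        omega

theorem chain_mono (f : Int → Int → Bool) :
    ∀ (m m' : Nat) (q : Int) (l : List String), m' ≤ m → chain f q l m = true → chain f q l m' = true := by
  intro m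
  induction m with
  | zero => intro m' q l h hc; interval_cases m'; simp [chain]
  | succ m ih =>
    intro m' q l h hc
    cases m' with
    | zero => simp [chain]
    | succ m' =>
      cases l with
      | nil => simp [chain] at hc
      | cons c rest =>
        simp only [chain] at hc ⊢
        cases hg : PySem.Dict.get? pvDigits c with
        | none => rw [hg] at hc; simp at hc
        | some d =>
          rw [hg] at hc
          simp at hc ⊢
          exact ⟨hc.1, ih m' d rest (by omega) hc.2⟩

theorem digits_get_some (s : String) (e : Int) (h : PySem.Dict.get? pvDigits s = some e) :
    0 ≤ e ∧ e ≤ 9 ∧ s = PySem.Int.toStr e := by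
  have hm := PySem.Dict.mem_items_of_get?_eq_some _ h
  have hit : pvDigits.items = [("0",0),("1",1),("2",2),("3",3),("4",4),("5",5),("6",6),("7",7),("8",8),("9",9)] := by decide
  rw [hit] at hm
  simp only [List.mem_cons, List.not_mem_nil, or_false, Prod.mk.injEq] at hm
  rcases hm with ⟨rfl,rfl⟩|⟨rfl,rfl⟩|⟨rfl,rfl⟩|⟨rfl,rfl⟩|⟨rfl,rfl⟩|⟨rfl,rfl⟩|⟨rfl,rfl⟩|⟨rfl,rfl⟩|⟨rfl,rfl⟩|⟨rfl,rfl⟩ <;> decide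

theorem digit_get (r : Int) (h0 : 0 ≤ r) (h9 : r ≤ 9) :
    PySem.Dict.get? pvDigits (PySem.Int.toStr r) = some r := by
  interval_cases r <;> decide

theorem mod10_bounds (x : Int) : 0 ≤ PySem.Int.mod x 10 ∧ PySem.Int.mod x 10 ≤ 9 := by
  have h1 := PySem.Int.mod_nonneg x (b := 10) (by norm_num)
  have h2 := PySem.Int.mod_lt x (b := 10) (by norm_num)
  omega

theorem mod10_shift (x a : Int) :
    PySem.Int.mod (PySem.Int.mod x 10 + a) 10 = PySem.Int.mod (x + a) 10 := by
  have hme : ∀ a : Int, PySem.Int.mod a 10 = a % 10 := fun a => PySem.Int.mod_eq_emod_of_pos (by norm_num)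
  simp only [hme]
  omega

theorem mod10_shift_sub (x a : Int) :
    PySem.Int.mod (PySem.Int.mod x 10 - a) 10 = PySem.Int.mod (x - a) 10 := by
  have hme : ∀ a : Int, PySem.Int.mod a 10 = a % 10 := fun a => PySem.Int.mod_eq_emod_of_pos (by norm_num)
  simp only [hme]
  omega

theorem stepA_iff (q e : Int) (hq0 : 0 ≤ q) (hq9 : q ≤ 9) (he0 : 0 ≤ e) (he9 : e ≤ 9) :
    stepA q e = true ↔ e = PySem.Int.mod (q + 1) 10 := by
  interval_cases q <;> interval_cases e <;> decide

theorem stepD_iff (q e : Int) (hq0 : 0 ≤ q) (hq9 : q ≤ 9) (he0 : 0 ≤ e) (he9 : e ≤ 9) :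
    stepD q e = true ↔ e = PySem.Int.mod (q - 1) 10 := by
  interval_cases q <;> interval_cases e <;> decide

theorem toStr_beq_false (e r : Int) (he0 : 0 ≤ e) (he9 : e ≤ 9) (hr0 : 0 ≤ r) (hr9 : r ≤ 9)
    (hne : e ≠ r) : (PySem.Int.toStr e == PySem.Int.toStr r) = false := by
  interval_cases e <;> interval_cases r <;> first | omega | decide

theorem chainA_cons (q : Int) (hq0 : 0 ≤ q) (hq9 : q ≤ 9) (x : String) (l : List String) (m : Nat) :
    chain stepA q (x :: l) (m + 1) =
      ((x == PySem.Int.toStr (PySem.Int.mod (q + 1) 10)) &&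
        chain stepA (PySem.Int.mod (q + 1) 10) l m) := by
  have hr := mod10_bounds (q + 1)
  cases hx : PySem.Dict.get? pvDigits x with
  | none =>
    simp only [chain, hx]
    have hbe : (x == PySem.Int.toStr (PySem.Int.mod (q + 1) 10)) = false := by
      cases hb : (x == PySem.Int.toStr (PySem.Int.mod (q + 1) 10))
      · rfl
      · exfalso
        rw [eq_of_beq hb, digit_get _ hr.1 hr.2] at hx
        cases hx
    rw [hbe]
    simp
  | some e =>
    obtain ⟨he0, he9, hxe⟩ := digits_get_some x e hx
    simp only [chain, hx]
    by_cases hs : stepA q e = true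
    · have he : e = PySem.Int.mod (q + 1) 10 := (stepA_iff q e hq0 hq9 he0 he9).mp hs
      subst hxe; subst he
      rw [hs, beq_self_eq_true]
    · simp only [Bool.not_eq_true] at hs
      have hne : e ≠ PySem.Int.mod (q + 1) 10 := by
        intro hcon
        rw [(stepA_iff q e hq0 hq9 he0 he9).mpr hcon] at hs
        cases hs
      subst hxe
      rw [toStr_beq_false e _ he0 he9 hr.1 hr.2 hne, hs]
      simp

theorem chainD_cons (q : Int) (hq0 : 0 ≤ q) (hq9 : q ≤ 9) (x : String) (l : List String) (m : Nat) :
    chain stepD q (x :: l) (m + 1) =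
      ((x == PySem.Int.toStr (PySem.Int.mod (q - 1) 10)) &&
        chain stepD (PySem.Int.mod (q - 1) 10) l m) := by
  have hr := mod10_bounds (q - 1)
  cases hx : PySem.Dict.get? pvDigits x with
  | none =>
    simp only [chain, hx]
    have hbe : (x == PySem.Int.toStr (PySem.Int.mod (q - 1) 10)) = false := by
      cases hb : (x == PySem.Int.toStr (PySem.Int.mod (q - 1) 10))
      · rfl
      · exfalso
        rw [eq_of_beq hb, digit_get _ hr.1 hr.2] at hx
        cases hx
    rw [hbe]
    simp
  | some e =>
    obtain ⟨he0, he9, hxe⟩ := digits_get_some x e hx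
    simp only [chain, hx]
    by_cases hs : stepD q e = true
    · have he : e = PySem.Int.mod (q - 1) 10 := (stepD_iff q e hq0 hq9 he0 he9).mp hs
      subst hxe; subst he
      rw [hs, beq_self_eq_true]
    · simp only [Bool.not_eq_true] at hs
      have hne : e ≠ PySem.Int.mod (q - 1) 10 := by
        intro hcon
        rw [(stepD_iff q e hq0 hq9 he0 he9).mpr hcon] at hs
        cases hs
      subst hxe
      rw [toStr_beq_false e _ he0 he9 hr.1 hr.2 hne, hs]
      simp

theorem hd4_cons (e : Int) (he0 : 0 ≤ e) (he9 : e ≤ 9) (b c d : String) (rest : List String) :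
    hd4 (PySem.Int.toStr e :: b :: c :: d :: rest) =
      (((b == PySem.Int.toStr (PySem.Int.mod (e + 1) 10)) &&
        ((c == PySem.Int.toStr (PySem.Int.mod (e + 2) 10)) &&
         (d == PySem.Int.toStr (PySem.Int.mod (e + 3) 10)))) ||
       ((b == PySem.Int.toStr (PySem.Int.mod (e - 1) 10)) &&
        ((c == PySem.Int.toStr (PySem.Int.mod (e - 2) 10)) &&
         (d == PySem.Int.toStr (PySem.Int.mod (e - 3) 10))))) := by
  have h1 := mod10_bounds (e + 1)
  have h2 := mod10_bounds (e - 1)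
  have h3 := mod10_bounds (PySem.Int.mod (e + 1) 10 + 1)
  have h4 := mod10_bounds (PySem.Int.mod (e - 1) 10 - 1)
  simp only [hd4, digit_get e he0 he9]
  rw [chainA_cons e he0 he9, chainA_cons _ h1.1 h1.2, chainA_cons _ (mod10_bounds _).1 (mod10_bounds _).2,
      chainD_cons e he0 he9, chainD_cons _ h2.1 h2.2, chainD_cons _ (mod10_bounds _).1 (mod10_bounds _).2]
  simp only [mod10_shift, mod10_shift_sub]
  rw [show e + 1 + 1 = e + 2 from by ring, show e - 1 - 1 = e - 2 from by ring]
  rw [show e + 2 + 1 = e + 3 from by ring, show e - 2 - 1 = e - 3 from by ring]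
  simp [chain]

theorem t1_full (e : Int) (he0 : 0 ≤ e) (he9 : e ≤ 9) :
    ∃ j : Nat, PySem.List.index? pvT1 (PySem.Int.toStr e) = some j ∧
      PySem.List.slice pvT1 (some (j : Int)) (some ((j : Int) + 4)) =
        [PySem.Int.toStr e, PySem.Int.toStr (PySem.Int.mod (e + 1) 10),
         PySem.Int.toStr (PySem.Int.mod (e + 2) 10), PySem.Int.toStr (PySem.Int.mod (e + 3) 10)] := by
  interval_cases e <;> first | exact ⟨0, by decide, by decide⟩ | exact ⟨1, by decide, by decide⟩ | exact ⟨2, by decide, by decide⟩ | exact ⟨3, by decide, by decide⟩ | exact ⟨4, by decide, by decide⟩ | exact ⟨5, by decide, by decide⟩ | exact ⟨6, by decide, by decide⟩ | exact ⟨7, by decide, by decide⟩ | exact ⟨8, by decide, by decide⟩ | exact ⟨9, by decide, by decide⟩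

theorem t2_full (e : Int) (he0 : 0 ≤ e) (he9 : e ≤ 9) :
    ∃ j : Nat, PySem.List.index? pvT2 (PySem.Int.toStr e) = some j ∧
      PySem.List.slice pvT2 (some (j : Int)) (some ((j : Int) + 4)) =
        [PySem.Int.toStr e, PySem.Int.toStr (PySem.Int.mod (e - 1) 10),
         PySem.Int.toStr (PySem.Int.mod (e - 2) 10), PySem.Int.toStr (PySem.Int.mod (e - 3) 10)] := by
  interval_cases e <;> first | exact ⟨0, by decide, by decide⟩ | exact ⟨1, by decide, by decide⟩ | exact ⟨2, by decide, by decide⟩ | exact ⟨3, by decide, by decide⟩ | exact ⟨4, by decide, by decide⟩ | exact ⟨5, by decide, by decide⟩ | exact ⟨6, by decide, by decide⟩ | exact ⟨7, by decide, by decide⟩ | exact ⟨8, by decide, by decide⟩ | exact ⟨9, by decide, by decide⟩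

theorem not_mem_t1 (s : String) (h : PySem.Dict.get? pvDigits s = none) : s ∉ pvT1 := by
  intro hmem
  have : ∃ r : Int, PySem.Dict.get? pvDigits s = some r := by
    simp only [pvT1, List.mem_cons, List.not_mem_nil, or_false] at hmem
    rcases hmem with rfl|rfl|rfl|rfl|rfl|rfl|rfl|rfl|rfl|rfl|rfl|rfl|rfl <;> first | exact ⟨0, by decide⟩ | exact ⟨1, by decide⟩ | exact ⟨2, by decide⟩ | exact ⟨3, by decide⟩ | exact ⟨4, by decide⟩ | exact ⟨5, by decide⟩ | exact ⟨6, by decide⟩ | exact ⟨7, by decide⟩ | exact ⟨8, by decide⟩ | exact ⟨9, by decide⟩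
  rcases this with ⟨r, hr⟩
  rw [h] at hr
  cases hr

theorem not_mem_t2 (s : String) (h : PySem.Dict.get? pvDigits s = none) : s ∉ pvT2 := by
  intro hmem
  exact not_mem_t1 s h (by simpa [pvT2] using hmem)

theorem check_eq_hd4 (p : List String) (j : Nat) (h : j + 4 ≤ p.length) :
    pvCheckA p (j : Int) = hd4 (p.drop j) := by
  have hlen : 4 ≤ (p.drop j).length := by
    simp only [List.length_drop]; omega
  obtain ⟨a, b, c, dd, rest, hdrop⟩ : ∃ a b c dd rest, p.drop j = a :: b :: c :: dd :: rest := by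
    rcases hL : p.drop j with _ | ⟨a, _ | ⟨b, _ | ⟨c, _ | ⟨dd, rest⟩⟩⟩⟩ <;>
      first
        | exact ⟨_, _, _, _, _, rfl⟩
        | (rw [hL] at hlen; simp at hlen)
  have hget : PySem.List.pyGet? p (j : Int) = some a := by
    rw [PySem.List.pyGet?_natCast]
    have h0 : (p.drop j)[0]? = p[j + 0]? := List.getElem?_drop ..
    rw [hdrop] at h0
    simpa using h0.symm
  have hslice : PySem.List.slice p (some (j : Int)) (some ((j : Int) + 4)) = [a, b, c, dd] := by
    have hcast : ((j : Int) + 4) = (((j + 4 : Nat)) : Int) := by push_cast; ring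
    rw [hcast, PySem.List.slice_natCast]
    have h3 : j + 4 - j = 4 := by omega
    rw [h3, hdrop]
    rfl
  rw [hdrop]
  cases hg : PySem.Dict.get? pvDigits a with
  | none =>
    have hn1 : PySem.List.index? pvT1 a = none := by
      rw [PySem.List.index?_eq_none_iff]; exact not_mem_t1 a hg
    have hn2 : PySem.List.index? pvT2 a = none := by
      rw [PySem.List.index?_eq_none_iff]; exact not_mem_t2 a hg
    simp only [pvCheckA, hget, hn1, hn2, hd4, hg]
    rfl
  | some e =>
    obtain ⟨he0, he9, rfl⟩ := digits_get_some a e hg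
    obtain ⟨j1, hj1, hw1⟩ := t1_full e he0 he9
    obtain ⟨j2, hj2, hw2⟩ := t2_full e he0 he9
    rw [hd4_cons e he0 he9]
    simp only [pvCheckA, hget, hj1, hj2, hw1, hw2, hslice]
    simp [List.cons_beq_cons]

theorem hd4_len (l : List String) (h : hd4 l = true) : 4 ≤ l.length := by
  cases l with
  | nil => simp [hd4] at h
  | cons c rest =>
    simp only [hd4] at h
    cases hg : PySem.Dict.get? pvDigits c with
    | none => rw [hg] at h; simp at h
    | some d =>
      rw [hg] at h
      simp only [Bool.or_eq_true] at h
      rcases h with h | h <;> · have := chain_len _ 3 _ _ h; simp only [List.length_cons]; omega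

theorem bad_iff (p : List String) : bad p = true ↔ ∃ j : Nat, hd4 (p.drop j) = true := by
  induction p with
  | nil => simp [bad, hd4]
  | cons c l ih =>
    simp only [bad, Bool.or_eq_true, ih]
    constructor
    · rintro (h | ⟨j, hj⟩)
      · exact ⟨0, h⟩
      · exact ⟨j + 1, hj⟩
    · rintro ⟨j, hj⟩
      cases j with
      | zero => exact Or.inl hj
      | succ j => exact Or.inr ⟨j, hj⟩

theorem A_eq_bad (p : List String) : case4 p = !bad p := by
  have hmain : (PySem.List.pyRange 0 ((p.length : Int) - 3) 1).any (fun i => pvCheckA p i) = bad p := by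
    rw [Bool.eq_iff_iff, List.any_eq_true, bad_iff]
    constructor
    · rintro ⟨i, hmem, hci⟩
      rw [PySem.List.mem_pyRange_one] at hmem
      obtain ⟨hi0, hi3⟩ := hmem
      have hij : i = ((i.toNat : Nat) : Int) := by omega
      rw [hij] at hci
      have h4 : i.toNat + 4 ≤ p.length := by omega
      rw [check_eq_hd4 p i.toNat h4] at hci
      exact ⟨i.toNat, hci⟩
    · rintro ⟨j, hj⟩
      have h4 : j + 4 ≤ p.length := by
        have := hd4_len _ hj
        simp only [List.length_drop] at this
        omega
      refine ⟨(j : Int), ?_, ?_⟩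
      · rw [PySem.List.mem_pyRange_one]
        constructor <;> omega
      · rw [check_eq_hd4 p j h4]
        exact hj
  unfold case4
  rw [hmain]

theorem loopB_char (l : List String) :
    (pvLoopB l none 0 0 = !bad l) ∧
    (∀ q asc desc : Int, 1 ≤ asc → asc ≤ 3 → 1 ≤ desc → desc ≤ 3 →
      pvLoopB l (some q) asc desc =
        !(chain stepA q l (4 - asc).toNat || chain stepD q l (4 - desc).toNat || bad l)) := by
  induction l with
  | nil =>
    constructor
    · rfl
    · intro q asc desc ha1 ha3 hd1 hd3
      have hA : (4 - asc).toNat = (4 - asc).toNat - 1 + 1 := by omega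
      have hD : (4 - desc).toNat = (4 - desc).toNat - 1 + 1 := by omega
      rw [hA, hD]
      simp [pvLoopB, chain, bad]
  | cons c rest ih =>
    constructor
    · cases hc : PySem.Dict.get? pvDigits c with
      | none =>
        simp only [pvLoopB, hc, ih.1, bad, hd4]
        simp
      | some d =>
        simp only [pvLoopB, hc]
        norm_num
        rw [ih.2 d 1 1 (by norm_num) (by norm_num) (by norm_num) (by norm_num)]
        simp only [bad, hd4, hc]
        simp [Bool.or_assoc]
    · intro q asc desc ha1 ha3 hd1 hd3
      cases hc : PySem.Dict.get? pvDigits c with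
      | none =>
        simp only [pvLoopB, hc, ih.1]
        have hA : (4 - asc).toNat = (4 - asc).toNat - 1 + 1 := by omega
        have hD : (4 - desc).toNat = (4 - desc).toNat - 1 + 1 := by omega
        rw [hA, hD]
        simp [chain, hc, bad, hd4]
      | some d =>
        have hT1 : ((4:Int) - 1).toNat = 2 + 1 := by decide
        have hT2 : ((4:Int) - 2).toNat = 1 + 1 := by decide
        have hT3 : ((4:Int) - 3).toNat = 0 + 1 := by decide
        have i11 := ih.2 d 1 1 (by norm_num) (by norm_num) (by norm_num) (by norm_num)
        have i12 := ih.2 d 1 2 (by norm_num) (by norm_num) (by norm_num) (by norm_num)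
        have i13 := ih.2 d 1 3 (by norm_num) (by norm_num) (by norm_num) (by norm_num)
        have i21 := ih.2 d 2 1 (by norm_num) (by norm_num) (by norm_num) (by norm_num)
        have i22 := ih.2 d 2 2 (by norm_num) (by norm_num) (by norm_num) (by norm_num)
        have i23 := ih.2 d 2 3 (by norm_num) (by norm_num) (by norm_num) (by norm_num)
        have i31 := ih.2 d 3 1 (by norm_num) (by norm_num) (by norm_num) (by norm_num)
        have i32 := ih.2 d 3 2 (by norm_num) (by norm_num) (by norm_num) (by norm_num)
        have i33 := ih.2 d 3 3 (by norm_num) (by norm_num) (by norm_num) (by norm_num)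
        have hcons : ∀ (f : Int → Int → Bool) (q' : Int) (m : Nat),
            chain f q' (c :: rest) (m + 1) = (f q' d && chain f d rest m) := by
          intro f q' m; simp [chain, hc]
        have ha' : asc = 1 ∨ asc = 2 ∨ asc = 3 := by omega
        have hd' : desc = 1 ∨ desc = 2 ∨ desc = 3 := by omega
        rcases ha' with rfl|rfl|rfl <;> rcases hd' with rfl|rfl|rfl <;>
          by_cases hA : (PySem.Int.mod (d - q) 10 == 1) = true <;>
            by_cases hB : (PySem.Int.mod (q - d) 10 == 1) = true <;>
              simp only [Bool.not_eq_true] at hA hB <;>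
                simp only [pvLoopB, hc, hT1, hT2, hT3, hcons, bad, hd4, stepA, stepD, hA, hB] <;>
                  norm_num <;>
                    try simp only [i11, i12, i13, i21, i22, i23, i31, i32, i33, hT1, hT2, hT3]
        all_goals
          clear i11 i12 i13 i21 i22 i23 i31 i32 i33 hcons hT1 hT2 hT3 ih ha1 ha3 hd1 hd3 hc
        all_goals
          by_cases h3A : chain stepA d rest 3 = true <;>
            by_cases h3D : chain stepD d rest 3 = true <;>
              simp only [Bool.not_eq_true] at h3A h3D <;>
                simp [h3A, h3D, chain_zero, chain_mono stepA 3 1 d rest (by omega), chain_mono stepA 3 2 d rest (by omega),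
                      chain_mono stepD 3 1 d rest (by omega), chain_mono stepD 3 2 d rest (by omega)]

theorem B_eq_bad (p : List String) : case4_alt p = !bad p := (loopB_char p).1

-- ===== VERDICT (by name: the statement is the Claim_ definition above) =====
theorem case4_spec : Claim_equal_case4 := by
  intro p _
  unfold Spec_case4
  rw [A_eq_bad p, show case4_alt p = !bad p from B_eq_bad p]
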